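-- pv_equiv track=rewrite | github.com/n7arti/2_course | 1_semestr/python/lab3/lab3.4.py | lab34
-- ===== SOURCE A (Python) =====
-- def lab34(a, b):
--     if b < a:
--         a, b = b, a
--     new_list = ()
--     max = 0
--     for i in range(a, b + 1):
--         s = 0
--         for j in range(i, 0, -1):
--             if i % j == 0:
--                 s += 1
--         if max < s:
--             max = s
--     for i in range(a, b + 1):
--         s = 0
--         for j in range(i, 0, -1):
--             if i % j == 0:
--                 s += 1
--         if s == max:
--             new_list = new_list + (i,)
--     return new_list
-- ===== SOURCE B (Python) =====
-- def _divcount(n):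
--     # number of j in 1..n dividing n (0 for n <= 0), via trial division up to sqrt(n)
--     c = 0
--     d = 1
--     while d * d <= n:
--         if n % d == 0:
--             c += 1 if d * d == n else 2
--         d += 1
--     return c
--
--
-- def lab34(a, b):
--     if b < a:
--         a, b = b, a
--     best = 0
--     res = []
--     for i in range(a, b + 1):
--         c = _divcount(i)
--         if c > best:
--             best = c
--             res = [i]
--         elif c == best:
--             res.append(i)
--     return tuple(res)
-- ===== Notes on version B (the rewrite author's own statement) =====
-- stated objective: faster
-- what changed: Replaces A's two identical passes over the range (each counting divisors of i by trying every j from i down to 1) with a single pass that keeps the running maximum divisor count and its witness list, counting divisors by trial division only up to sqrt(i) with paired counting.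
import Mathlib
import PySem

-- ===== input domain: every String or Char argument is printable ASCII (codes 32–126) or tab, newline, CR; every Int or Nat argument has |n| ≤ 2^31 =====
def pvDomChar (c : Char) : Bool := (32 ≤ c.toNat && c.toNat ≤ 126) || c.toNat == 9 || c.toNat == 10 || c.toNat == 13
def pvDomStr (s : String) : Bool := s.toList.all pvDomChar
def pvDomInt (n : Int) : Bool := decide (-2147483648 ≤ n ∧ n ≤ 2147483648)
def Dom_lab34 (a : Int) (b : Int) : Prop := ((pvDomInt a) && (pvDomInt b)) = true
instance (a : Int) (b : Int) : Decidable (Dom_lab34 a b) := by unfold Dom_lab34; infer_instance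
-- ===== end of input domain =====

-- B replaces A's two full passes (each counting divisors of i by trying every j in 1..i) by a
-- single pass that keeps the running maximum and its witnesses, counting divisors only up to sqrt(i).

-- ===== PORT A =====
-- A's inner loop: 'for j in range(i, 0, -1): if i % j == 0: s += 1'
def countA (i : Int) : Int :=
  (PySem.List.pyRange i 0 (-1)).foldl (fun s j => if PySem.Int.mod i j == 0 then s + 1 else s) 0

def lab34 (a : Int) (b : Int) : List Int :=
  let ab := if b < a then (b, a) else (a, b)
  let r := PySem.List.pyRange ab.1 (ab.2 + 1) 1
  let mx := r.foldl (fun m i => let s := countA i; if m < s then s else m) 0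
  r.foldl (fun nl i => let s := countA i; if s == mx then nl ++ [i] else nl) []

-- ===== PORT B =====
-- B's inner loop: 'while d*d <= n: if n % d == 0: c += 1 if d*d == n else 2; d += 1'
def divcountLoop (n : Int) (d : Int) (c : Int) : Int :=
  if d * d ≤ n then
    divcountLoop n (d + 1)
      (if PySem.Int.mod n d == 0 then (if d * d == n then c + 1 else c + 2) else c)
  else c
termination_by (n + 1 - d).toNat
decreasing_by
  have h0 : (0 : Int) ≤ n := le_trans (mul_self_nonneg d) (by assumption)
  have h1 : 2 * d ≤ n + 1 := by nlinarith [sq_nonneg (d - 1)]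
  omega

def divcount (n : Int) : Int := divcountLoop n 1 0

def lab34_alt (a : Int) (b : Int) : List Int :=
  let ab := if b < a then (b, a) else (a, b)
  let st := (PySem.List.pyRange ab.1 (ab.2 + 1) 1).foldl
    (fun st i =>
      let c := divcount i
      if st.1 < c then (c, [i])
      else if c == st.1 then (st.1, st.2 ++ [i]) else st)
    ((0 : Int), ([] : List Int))
  st.2

-- ===== PRECONDITION & SPEC =====
def Spec_lab34 (a : Int) (b : Int) (out : List Int) : Prop := out = lab34_alt a b
instance (a : Int) (b : Int) (out : List Int) : Decidable (Spec_lab34 a b out) := by unfold Spec_lab34; infer_instance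

-- ===== CLAIM (what is proved, stated in full; the proofs are below) =====
def Claim_equal_lab34 : Prop := ∀ (a : Int) (b : Int), Dom_lab34 a b → Spec_lab34 a b (lab34 a b)

-- ===== LEMMAS AND PROOFS =====

theorem countP_range_card (N : Nat) (p : Nat → Bool) :
    (List.range N).countP p = ((Finset.range N).filter (fun k => p k)).card := by
  induction N with
  | zero => simp
  | succ n ih =>
    rw [List.range_succ, Finset.range_add_one, List.countP_append, Finset.filter_insert]
    split <;> simp [Finset.card_insert_of_notMem, *]

theorem divisors_eq_map (N : Nat) :
    N.divisors = ((Finset.range N).filter (fun k => decide ((k+1) ∣ N))).map ⟨(· + 1), fun a b h => by simpa using h⟩ := by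
  ext j
  simp only [Nat.mem_divisors, Finset.mem_map, Finset.mem_filter, Finset.mem_range,
    Function.Embedding.coeFn_mk, decide_eq_true_eq]
  constructor
  · rintro ⟨hj, hN⟩
    have h1 : 1 ≤ j := Nat.one_le_iff_ne_zero.mpr (by rintro rfl; simp at hj; omega)
    have h2 : j ≤ N := Nat.le_of_dvd (by omega) hj
    exact ⟨j - 1, ⟨by omega, by rwa [Nat.sub_add_cancel h1]⟩, by omega⟩
  · rintro ⟨k, ⟨hk, hd⟩, rfl⟩
    exact ⟨hd, by omega⟩

-- A's inner loop counts every divisor in 1..n, i.e. all of them.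
theorem countA_eq_card (n : Int) (hn : 1 ≤ n) : countA n = (n.toNat.divisors.card : Int) := by
  unfold countA
  rw [PySem.List.foldl_if_add_one]
  rw [PySem.List.pyRange_neg_one_eq_reverse]
  rw [List.countP_reverse]
  rw [PySem.List.pyRange_one]
  rw [List.countP_map]
  have hN : ((n + 1) - (0 + 1)).toNat = n.toNat := by omega
  rw [hN, divisors_eq_map, Finset.card_map, ← countP_range_card, zero_add]
  have hfun : ((fun j => PySem.Int.mod n j == 0) ∘ fun k : Nat => (0:Int) + 1 + (k:Int))
      = (fun k : Nat => decide ((k+1) ∣ n.toNat)) := by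
    funext k
    simp only [Function.comp]
    have h1 : ((0:Int) + 1 + (k:Int)) = ((k+1 : Nat) : Int) := by push_cast; ring
    rw [h1, Bool.eq_iff_iff]
    have hcast : (((k+1:Nat)):Int) ∣ n ↔ (k+1) ∣ n.toNat := by
      rw [show n = ((n.toNat : Int)) from (Int.toNat_of_nonneg (by omega)).symm]
      exact Int.natCast_dvd_natCast
    simp only [beq_iff_eq, PySem.Int.mod_eq_zero_iff_dvd, decide_eq_true_eq]
    exact_mod_cast hcast
  rw [hfun]

theorem countA_nonpos (n : Int) (hn : n ≤ 0) : countA n = 0 := by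
  unfold countA
  rw [PySem.List.pyRange_neg_one_eq_nil hn]
  rfl

-- B's trial-division loop from d sums 1 (square root) or 2 (divisor pair) over the
-- divisors j ≥ d with j*j ≤ n.
theorem divcountLoop_eq (n : Int) (hn : 1 ≤ n) (d : Int) (hd : 1 ≤ d) (c : Int) :
    divcountLoop n d c = c + ∑ j ∈ n.toNat.divisors.filter
        (fun j : Nat => d ≤ (j:Int) ∧ (j:Int)*(j:Int) ≤ n),
      (if (j:Int)*(j:Int) = n then (1:Int) else 2) := by
  rw [divcountLoop]
  by_cases h : d * d ≤ n
  · rw [if_pos h]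
    rw [divcountLoop_eq n hn (d+1) (by omega) _]
    have hdn : d ≤ n := by nlinarith [sq_nonneg (d - 1)]
    have hmem : d.toNat ∈ n.toNat.divisors ↔ d ∣ n := by
      rw [Nat.mem_divisors]
      constructor
      · rintro ⟨hj, -⟩
        have := Int.natCast_dvd_natCast.mpr hj
        rwa [Int.toNat_of_nonneg (by omega), Int.toNat_of_nonneg (by omega)] at this
      · intro hj
        refine ⟨?_, by omega⟩
        rw [← Int.natCast_dvd_natCast, Int.toNat_of_nonneg (by omega), Int.toNat_of_nonneg (by omega)]
        exact hj
    have key : ∑ j ∈ n.toNat.divisors.filter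
          (fun j : Nat => d ≤ (j:Int) ∧ (j:Int)*(j:Int) ≤ n), (if (j:Int)*(j:Int) = n then (1:Int) else 2)
        = (if d ∣ n then (if d * d = n then (1:Int) else 2) else 0)
          + ∑ j ∈ n.toNat.divisors.filter
          (fun j : Nat => d + 1 ≤ (j:Int) ∧ (j:Int)*(j:Int) ≤ n), (if (j:Int)*(j:Int) = n then (1:Int) else 2) := by
      rw [Finset.sum_filter, Finset.sum_filter]
      have hd0 : (if d ∣ n then (if d * d = n then (1:Int) else 2) else 0)
          = ∑ j ∈ n.toNat.divisors, (if j = d.toNat then (if (j:Int)*(j:Int) = n then (1:Int) else 2) else 0) := by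
        rw [Finset.sum_ite_eq' n.toNat.divisors d.toNat
          (fun j => (if (j:Int)*(j:Int) = n then (1:Int) else 2))]
        by_cases hdvd : d ∣ n
        · rw [if_pos (hmem.mpr hdvd)]
          have : ((d.toNat : Int)) = d := Int.toNat_of_nonneg (by omega)
          rw [this, if_pos hdvd]
        · rw [if_neg (fun hc => hdvd (hmem.mp hc)), if_neg hdvd]
      rw [hd0, ← Finset.sum_add_distrib]
      apply Finset.sum_congr rfl
      intro j hj
      have hj1 : 1 ≤ j := Nat.pos_of_mem_divisors hj
      by_cases hjd : j = d.toNat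
      · subst hjd
        have hdt : ((d.toNat : Int)) = d := Int.toNat_of_nonneg (by omega)
        rw [hdt]
        generalize hq : d * d = q at *
        generalize (if q = n then (1:Int) else 2) = w
        split_ifs <;> omega
      · generalize hq : (j:Int) * (j:Int) = q
        generalize (if q = n then (1:Int) else 2) = w
        split_ifs <;> omega
    rw [key]
    by_cases hdvd : d ∣ n
    · rw [if_pos ((PySem.Int.mod_eq_zero_iff_dvd n d).mpr hdvd |> (beq_iff_eq).mpr), if_pos hdvd]
      by_cases hsq : d * d = n
      · rw [if_pos ((beq_iff_eq).mpr hsq), if_pos hsq]; ring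
      · rw [if_neg (fun hc => hsq ((beq_iff_eq).mp hc)), if_neg hsq]; ring
    · rw [if_neg (fun hc => hdvd ((PySem.Int.mod_eq_zero_iff_dvd n d).mp ((beq_iff_eq).mp hc))), if_neg hdvd]
      ring
  · rw [if_neg h]
    have : n.toNat.divisors.filter (fun j : Nat => d ≤ (j:Int) ∧ (j:Int)*(j:Int) ≤ n) = ∅ := by
      rw [Finset.filter_eq_empty_iff]
      rintro j hj ⟨h1, h2⟩
      have : 0 < (j:Int) := by omega
      nlinarith
    rw [this, Finset.sum_empty]; ring
termination_by (n + 1 - d).toNat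
decreasing_by
  have h1 : 2 * d ≤ n + 1 := by nlinarith [sq_nonneg (d - 1)]
  omega

-- divisor pairing d ↔ N/d: the number of divisors equals B's weighted sum up to the square root.
theorem card_eq_sum (N : Nat) (h : 1 ≤ N) :
    (N.divisors.card : Int) = ∑ j ∈ N.divisors.filter (fun j : Nat => (j:Int)*(j:Int) ≤ (N:Int)),
      (if (j:Int)*(j:Int) = (N:Int) then (1:Int) else 2) := by
  have flip : ∀ j ∈ N.divisors, ((N:Int) < ((N/j : Nat):Int)*((N/j : Nat):Int) ↔ (j:Int)*(j:Int) < (N:Int)) := by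
    intro j hj
    obtain ⟨hjd, hN0⟩ := Nat.mem_divisors.mp hj
    have hj1 : 1 ≤ j := Nat.pos_of_mem_divisors hj
    have hmul : (N / j) * j = N := Nat.div_mul_cancel hjd
    have he1 : 1 ≤ N / j := Nat.one_le_div_iff hj1 |>.mpr (Nat.le_of_dvd (by omega) hjd)
    constructor
    · intro hlt
      by_contra hc
      have hNat : N < (N/j)*(N/j) := by exact_mod_cast hlt
      have hNat2 : N ≤ j * j := by
        have : ¬ ((j:Int)*(j:Int) < (N:Int)) := hc
        push_cast at this
        exact_mod_cast not_lt.mp this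
      nlinarith
    · intro hlt
      have hNat : j*j < N := by exact_mod_cast hlt
      have : N < (N/j)*(N/j) := by nlinarith
      exact_mod_cast this
  have hsplit : (N.divisors.card : Int)
      = ∑ j ∈ N.divisors, ((if (j:Int)*(j:Int) ≤ (N:Int) then (1:Int) else 0)
        + (if (N:Int) < (j:Int)*(j:Int) then (1:Int) else 0)) := by
    rw [Finset.card_eq_sum_ones]
    push_cast
    apply Finset.sum_congr rfl
    intro j hj
    by_cases hc : (j:Int)*(j:Int) ≤ (N:Int)
    · rw [if_pos hc, if_neg (by omega)]; ring
    · rw [if_neg hc, if_pos (by omega)]; ring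
  have hflip_sum : ∑ j ∈ N.divisors, (if (N:Int) < (j:Int)*(j:Int) then (1:Int) else 0)
      = ∑ j ∈ N.divisors, (if (j:Int)*(j:Int) < (N:Int) then (1:Int) else 0) := by
    rw [← Nat.sum_div_divisors N (fun j => if (N:Int) < (j:Int)*(j:Int) then (1:Int) else 0)]
    apply Finset.sum_congr rfl
    intro j hj
    by_cases hc : (j:Int)*(j:Int) < (N:Int)
    · rw [if_pos ((flip j hj).mpr hc), if_pos hc]
    · rw [if_neg (fun hcc => hc ((flip j hj).mp hcc)), if_neg hc]
  rw [hsplit, Finset.sum_add_distrib, hflip_sum, ← Finset.sum_add_distrib, Finset.sum_filter]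
  apply Finset.sum_congr rfl
  intro j hj
  generalize hq : (j:Int) * (j:Int) = q
  split_ifs <;> omega

-- the two divisor-counting loops agree on every integer
theorem count_eq (n : Int) : countA n = divcount n := by
  by_cases hn : 1 ≤ n
  · rw [countA_eq_card n hn, divcount, divcountLoop_eq n hn 1 le_rfl 0, zero_add]
    have hNn : ((n.toNat : Int)) = n := Int.toNat_of_nonneg (by omega)
    rw [card_eq_sum n.toNat (by omega)]
    simp only [hNn]
    refine Finset.sum_congr ?_ (fun x _ => rfl)
    apply Finset.filter_congr
    intro j hj
    have hj1 : 1 ≤ j := Nat.pos_of_mem_divisors hj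
    constructor
    · rintro h2; exact ⟨by exact_mod_cast hj1, h2⟩
    · rintro ⟨-, h2⟩; exact h2
  · rw [countA_nonpos n (by omega), divcount, divcountLoop, if_neg (by omega : ¬ ((1:Int) * 1 ≤ n))]

-- B's single pass computes A's two passes: the final best is the running maximum, and the
-- collected list is exactly the elements whose score equals it.
theorem onepass_eq (f : Int → Int) (L : List Int) : ∀ (m : Int) (r : List Int),
    (L.foldl (fun st i =>
        let c := f i
        if st.1 < c then (c, [i]) else if c == st.1 then (st.1, st.2 ++ [i]) else st) (m, r))
    = (L.foldl (fun acc y => max acc (f y)) m,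
       (if m = L.foldl (fun acc y => max acc (f y)) m then r else [])
         ++ L.filter (fun i => f i == L.foldl (fun acc y => max acc (f y)) m)) := by
  induction L with
  | nil => intro m r; simp
  | cons i t ih =>
    intro m r
    have hge : ∀ (m0 : Int), m0 ≤ t.foldl (fun acc y => max acc (f y)) m0 :=
      fun m0 => (PySem.List.le_foldl_max_int t f m0).1
    simp only [List.foldl_cons]
    by_cases h1 : m < f i
    · rw [if_pos h1, ih]
      have hmax : max m (f i) = f i := by omega
      simp only [hmax]
      have hMge : f i ≤ t.foldl (fun acc y => max acc (f y)) (f i) := hge (f i)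
      congr 1
      have hmne : ¬ (m = t.foldl (fun acc y => max acc (f y)) (f i)) := by omega
      rw [if_neg hmne, List.filter_cons]
      by_cases h2 : f i = t.foldl (fun acc y => max acc (f y)) (f i)
      · rw [if_pos h2, if_pos (show (f i == t.foldl (fun acc y => max acc (f y)) (f i)) = true from beq_iff_eq.mpr h2)]
        simp
      · rw [if_neg h2, if_neg (show ¬ (f i == t.foldl (fun acc y => max acc (f y)) (f i)) = true by simp only [beq_iff_eq]; exact h2)]
    · rw [if_neg h1]
      have hmax : max m (f i) = m := by omega
      have hMgt : m ≤ t.foldl (fun acc y => max acc (f y)) m := hge m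
      by_cases h2 : f i == m
      · rw [if_pos h2, ih]
        simp only [hmax]
        have h2' : f i = m := by simpa using h2
        congr 1
        rw [List.filter_cons]
        by_cases h3 : m = t.foldl (fun acc y => max acc (f y)) m
        · rw [if_pos h3, if_pos h3,
            if_pos (show (f i == t.foldl (fun acc y => max acc (f y)) m) = true from beq_iff_eq.mpr (h2'.trans h3))]
          simp
        · rw [if_neg h3, if_neg h3,
            if_neg (show ¬ (f i == t.foldl (fun acc y => max acc (f y)) m) = true by simp only [beq_iff_eq]; omega)]
      · rw [if_neg h2, ih]
        simp only [hmax]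
        have h2' : f i ≠ m := by simpa using h2
        congr 1
        rw [List.filter_cons]
        rw [if_neg (show ¬ (f i == t.foldl (fun acc y => max acc (f y)) m) = true by simp only [beq_iff_eq]; omega)]

-- ===== VERDICT (by name: the statement is the Claim_ definition above) =====
theorem lab34_spec : Claim_equal_lab34 := by
  intro a b _
  unfold Spec_lab34 lab34 lab34_alt
  generalize (if b < a then (b, a) else (a, b)) = ab
  have hstep : (fun (m i : Int) => let s := countA i; if m < s then s else m)
      = (fun (acc y : Int) => max acc (divcount y)) := by
    funext m i
    show (if m < countA i then countA i else m) = max m (divcount i)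
    rw [count_eq i]
    by_cases h : m < divcount i
    · rw [if_pos h]; omega
    · rw [if_neg h]; omega
  simp only [hstep]
  rw [onepass_eq divcount (PySem.List.pyRange ab.1 (ab.2 + 1) 1) 0 []]
  rw [PySem.List.foldl_append_if_eq_filter]
  have hp : (fun i => countA i ==
        (PySem.List.pyRange ab.1 (ab.2 + 1) 1).foldl (fun acc y => max acc (divcount y)) 0)
      = (fun i => divcount i ==
        (PySem.List.pyRange ab.1 (ab.2 + 1) 1).foldl (fun acc y => max acc (divcount y)) 0) := by
    funext i; rw [count_eq i]
  rw [hp]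
  simp [ite_self]
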